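-- pv_equiv track=rewrite | github.com/dantmac/Python_Test | Practice/practice_6.1.py | process_array
-- ===== SOURCE A (Python) =====
-- def process_array(arr):
--     even_sum = 0
--     odd_product = 1
--
--     for i in range(len(arr)):
--         if i % 2 == 0:
--             even_sum += arr[i]
--         else:
--             odd_product *= arr[i]
--
--     return even_sum, odd_product
-- ===== SOURCE B (Python) =====
-- def process_array(arr):
--     # pairwise consumption: take elements two at a time from one iterator,
--     # adding the first of each pair and multiplying the second (1 pads an odd tail)
--     even_sum = 0
--     odd_product = 1
--     it = iter(arr)
--     for x in it:
--         even_sum += x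
--         odd_product *= next(it, 1)
--     return even_sum, odd_product
-- ===== Notes on version B (the rewrite author's own statement) =====
-- stated objective: alternative
-- what changed: Replaces the index loop with an i%2 branch by a structural recursion that consumes the list two elements at a time, adding the first and multiplying the second of each pair.
import Mathlib
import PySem

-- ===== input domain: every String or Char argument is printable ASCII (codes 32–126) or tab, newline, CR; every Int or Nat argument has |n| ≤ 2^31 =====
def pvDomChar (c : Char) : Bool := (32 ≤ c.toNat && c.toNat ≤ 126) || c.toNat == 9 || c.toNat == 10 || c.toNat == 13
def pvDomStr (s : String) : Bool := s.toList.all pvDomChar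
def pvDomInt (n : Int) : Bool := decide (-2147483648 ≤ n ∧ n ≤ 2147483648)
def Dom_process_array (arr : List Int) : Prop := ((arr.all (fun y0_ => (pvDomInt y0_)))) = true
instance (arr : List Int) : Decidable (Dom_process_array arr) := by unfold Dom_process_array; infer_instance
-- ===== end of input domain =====

-- B replaces A's indexed loop with an i%2 branch by one pairwise pass that
-- consumes two elements per step (add the first, multiply the second); alternative decomposition, same cost.


-- ===== PORT A =====
-- for i in range(len(arr)): branch on i % 2, state (even_sum, odd_product)
def process_array (arr : List Int) : Int × Int :=
  (PySem.List.pyRange 0 (PySem.List.len arr) 1).foldl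
    (fun st i =>
      if i % 2 == 0 then (st.1 + PySem.List.pyGetD arr i 0, st.2)
      else (st.1, st.2 * PySem.List.pyGetD arr i 0))
    (0, 1)

-- ===== PORT B =====
-- pairwise pass: consume two elements per step, accumulating (even_sum, odd_product)
def pvPairGo : List Int → Int × Int → Int × Int
  | [], st => st
  | [x], (s, p) => (s + x, p * 1)        -- next(it, 1) pads an odd tail with 1
  | x :: y :: rest, (s, p) => pvPairGo rest (s + x, p * y)

def process_array_alt (arr : List Int) : Int × Int :=
  pvPairGo arr (0, 1)

-- ===== PRECONDITION & SPEC =====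
def Spec_process_array (arr : List Int) (out : Int × Int) : Prop := out = process_array_alt arr
instance (arr : List Int) (out : Int × Int) : Decidable (Spec_process_array arr out) := by unfold Spec_process_array; infer_instance

-- ===== CLAIM (what is proved, stated in full; the proofs are below) =====
def Claim_equal_process_array : Prop := ∀ (arr : List Int), Dom_process_array arr → Spec_process_array arr (process_array arr)

-- ===== LEMMAS AND PROOFS =====

-- A's loop over enumerate with an even starting index equals B's pairwise pass.
theorem pvKey : ∀ (xs : List Int) (s a b : Int), s % 2 = 0 →
    (PySem.List.enumerate xs s).foldl
      (fun (st : Int × Int) (p : Int × Int) =>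
        if p.1 % 2 == 0 then (st.1 + p.2, st.2) else (st.1, st.2 * p.2))
      (a, b) = pvPairGo xs (a, b)
  | [], s, a, b, _ => by simp [pvPairGo]
  | [x], s, a, b, hs => by
      have h1 : (s % 2 == 0) = true := by simp [hs]
      simp only [PySem.List.enumerate_cons, PySem.List.enumerate_nil, List.foldl_cons,
        List.foldl_nil, pvPairGo]
      rw [if_pos h1, mul_one]
  | x :: y :: rest, s, a, b, hs => by
      have h1 : (s % 2 == 0) = true := by simp [hs]
      have h2 : ¬ (((s + 1) % 2 == 0) = true) := by simp; omega
      simp only [PySem.List.enumerate_cons, List.foldl_cons]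
      rw [if_pos h1, if_neg h2]
      show List.foldl _ (a + x, b * y) (PySem.List.enumerate rest (s + 1 + 1)) = pvPairGo (x :: y :: rest) (a, b)
      rw [show s + 1 + 1 = s + 2 by ring, pvPairGo]
      exact pvKey rest (s + 2) (a + x) (b * y) (by omega)

-- ===== VERDICT (by name: the statement is the Claim_ definition above) =====
theorem process_array_spec : Claim_equal_process_array := by
  intro arr _
  unfold Spec_process_array process_array process_array_alt
  have he := PySem.List.enumerate_eq_map_pyRange (xs := arr) (d := 0)
  calc (PySem.List.pyRange 0 (PySem.List.len arr) 1).foldl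
        (fun st i => if i % 2 == 0 then (st.1 + PySem.List.pyGetD arr i 0, st.2)
          else (st.1, st.2 * PySem.List.pyGetD arr i 0)) (0, 1)
      = (PySem.List.enumerate arr 0).foldl
          (fun (st : Int × Int) (p : Int × Int) =>
            if p.1 % 2 == 0 then (st.1 + p.2, st.2) else (st.1, st.2 * p.2)) (0, 1) := by
        rw [he, List.foldl_map]
    _ = pvPairGo arr (0, 1) := pvKey arr 0 0 1 (by decide)
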